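-- pv_equiv track=rewrite | github.com/HumanCompatibleAI/better-adversarial-defenses | ap_rllib/helpers.py | burst_sizes
-- ===== SOURCE A (Python) =====
-- def burst_sizes(wt):
--     """Get burst sizes from a list of players being trained at iterations."""
--     prev_val = 0
--     current = 0
--     arr = []
--     for val in wt:
--         current += 1
--         if prev_val != val:
--             arr.append(current)
--             current = 0
--         prev_val = val
--     return arr
-- ===== SOURCE B (Python) =====
-- def burst_sizes(wt):
--     boundaries = [i for i, (p, v) in enumerate(zip([0] + wt, wt)) if p != v]
--     return [b - p for p, b in zip([-1] + boundaries, boundaries)]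
-- ===== Notes on version B (the rewrite author's own statement) =====
-- stated objective: alternative
-- what changed: Replaces A's running-counter-with-reset loop by a two-stage decomposition: collect transition indices with enumerate/zip, then return consecutive differences of the boundary list (seeded before index zero) via zip.
import Mathlib
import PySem

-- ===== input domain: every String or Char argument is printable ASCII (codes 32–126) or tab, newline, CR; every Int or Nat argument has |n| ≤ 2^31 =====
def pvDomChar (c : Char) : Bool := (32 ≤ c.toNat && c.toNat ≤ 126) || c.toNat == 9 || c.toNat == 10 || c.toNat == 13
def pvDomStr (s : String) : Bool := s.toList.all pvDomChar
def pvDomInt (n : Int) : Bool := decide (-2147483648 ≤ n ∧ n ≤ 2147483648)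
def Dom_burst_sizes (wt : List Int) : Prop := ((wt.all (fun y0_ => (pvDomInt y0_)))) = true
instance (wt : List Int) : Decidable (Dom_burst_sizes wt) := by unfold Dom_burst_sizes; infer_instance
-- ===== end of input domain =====

-- B computes transition indices first, then the result as consecutive differences (simpler decomposition).

-- ===== PORT A =====
-- literal port of A's loop: state (prev_val, current, arr)
def burst_sizes (wt : List Int) : List Int :=
  (wt.foldl
    (fun (st : Int × Int × List Int) val =>
      let current := st.2.1 + 1
      if st.1 ≠ val then (val, 0, st.2.2 ++ [current]) else (val, current, st.2.2))
    (0, 0, [])).2.2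

-- ===== PORT B =====
-- boundaries = [i for i, (p, v) in enumerate(zip([0] + wt, wt)) if p != v]
-- return [b - p for p, b in zip([-1] + boundaries, boundaries)]
def burst_sizes_alt (wt : List Int) : List Int :=
  let boundaries :=
    ((PySem.List.enumerate (List.zip ((0 : Int) :: wt) wt) 0).filter
      (fun x => x.2.1 ≠ x.2.2)).map (fun x => x.1)
  (List.zip ((-1 : Int) :: boundaries) boundaries).map (fun pb => pb.2 - pb.1)

-- ===== PRECONDITION & SPEC =====
def Spec_burst_sizes (wt : List Int) (out : List Int) : Prop := out = burst_sizes_alt wt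
instance (wt : List Int) (out : List Int) : Decidable (Spec_burst_sizes wt out) := by unfold Spec_burst_sizes; infer_instance

-- ===== CLAIM (what is proved, stated in full; the proofs are below) =====
def Claim_equal_burst_sizes : Prop := ∀ (wt : List Int), Dom_burst_sizes wt → Spec_burst_sizes wt (burst_sizes wt)

-- ===== LEMMAS AND PROOFS =====

/-- absolute indices (starting at `off`) where the element differs from its predecessor (`prev` before the first). -/
def pvBounds (prev off : Int) : List Int → List Int
  | [] => []
  | v :: vs => (if prev ≠ v then [off] else []) ++ pvBounds v (off + 1) vs

/-- consecutive differences with previous value `p`. -/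
def pvDiffs (p : Int) : List Int → List Int
  | [] => []
  | b :: bs => (b - p) :: pvDiffs b bs

theorem pvBounds_enum : ∀ (l : List Int) (prev off : Int),
    ((PySem.List.enumerate (List.zip (prev :: l) l) off).filter
      (fun x => x.2.1 ≠ x.2.2)).map (fun x => x.1) = pvBounds prev off l := by
  intro l
  induction l with
  | nil => intro prev off; simp [PySem.List.enumerate_nil, pvBounds]
  | cons v vs ih =>
    intro prev off
    simp only [List.zip_cons_cons, PySem.List.enumerate_cons, pvBounds, List.filter]
    simp only [ne_eq, decide_not] at ih
    by_cases h : prev = v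
    · simp [h, ih]
    · simp [h, ih]

theorem pvDiffs_zip : ∀ (bs : List Int) (p : Int),
    (List.zip (p :: bs) bs).map (fun pb => pb.2 - pb.1) = pvDiffs p bs := by
  intro bs
  induction bs with
  | nil => intro p; simp [pvDiffs]
  | cons b bs ih => intro p; simp [pvDiffs, ih]

theorem pvA_loop : ∀ (l : List Int) (prev cur : Int) (arr : List Int) (off : Int),
    (l.foldl
      (fun (st : Int × Int × List Int) val =>
        let current := st.2.1 + 1
        if st.1 ≠ val then (val, 0, st.2.2 ++ [current]) else (val, current, st.2.2))
      (prev, cur, arr)).2.2 = arr ++ pvDiffs (off - cur - 1) (pvBounds prev off l) := by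
  intro l
  induction l with
  | nil => intro prev cur arr off; simp [pvBounds, pvDiffs]
  | cons v vs ih =>
    intro prev cur arr off
    simp only [List.foldl_cons, pvBounds]
    by_cases h : prev = v
    · simp only [h, ne_eq, not_true_eq_false, if_false, List.nil_append]
      rw [ih v (cur + 1) arr (off + 1)]
      have : off + 1 - (cur + 1) - 1 = off - cur - 1 := by ring
      rw [this]
    · simp only [ne_eq, h, not_false_eq_true, if_true, List.cons_append, List.nil_append]
      rw [ih v 0 (arr ++ [cur + 1]) (off + 1)]
      simp only [pvDiffs, List.append_assoc, List.singleton_append]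
      have : off - (off - cur - 1) = cur + 1 := by ring
      rw [this]
      have : off + 1 - 0 - 1 = off := by ring
      rw [this]

-- ===== VERDICT (by name: the statement is the Claim_ definition above) =====
theorem burst_sizes_spec : Claim_equal_burst_sizes := by
  intro wt _
  show burst_sizes wt = burst_sizes_alt wt
  unfold burst_sizes burst_sizes_alt
  rw [pvA_loop wt 0 0 [] 0, pvBounds_enum, pvDiffs_zip]
  norm_num
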